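-- pv_equiv track=rewrite | github.com/quantmew/pyinkcli | src/ink_python/ansi_tokenizer.py | _read_csi_sequence
-- ===== SOURCE A (Python) =====
-- def _read_csi_sequence(text: str, from_index: int) -> tuple[int, str, str, str] | None:
--     index = from_index
--     while index < len(text) and _is_csi_parameter_character(text[index]):
--         index += 1
--     parameter_string = text[from_index:index]
--
--     intermediate_start_index = index
--     while index < len(text) and _is_csi_intermediate_character(text[index]):
--         index += 1
--     intermediate_string = text[intermediate_start_index:index]
--
--     final_character = text[index] if index < len(text) else None
--     if final_character is None or not _is_csi_final_character(final_character):
--         return None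
--
--     return (index + 1, parameter_string, intermediate_string, final_character)
--
-- def _is_csi_parameter_character(character: str) -> bool:
--     code_point = ord(character)
--     return 0x30 <= code_point <= 0x3F
--
-- def _is_csi_intermediate_character(character: str) -> bool:
--     code_point = ord(character)
--     return 0x20 <= code_point <= 0x2F
--
-- def _is_csi_final_character(character: str) -> bool:
--     code_point = ord(character)
--     return 0x40 <= code_point <= 0x7E
-- ===== SOURCE B (Python) =====
-- def _read_csi_sequence(text: str, from_index: int) -> tuple[int, str, str, str] | None:
--     parameters = ""
--     intermediates = ""
--     for index in range(from_index, len(text)):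
--         character = text[index]
--         if "0" <= character <= "?" and not intermediates:
--             parameters += character
--         elif " " <= character <= "/":
--             intermediates += character
--         elif "@" <= character <= "~":
--             return (index + 1, parameters, intermediates, character)
--         else:
--             return None
--     return None
-- ===== Notes on version B (the rewrite author's own statement) =====
-- stated objective: simpler
-- what changed: Replaces A's two separate index-advancing while-loops plus slicing and a trailing final-character check by a single fused for-loop that classifies each character with direct character-range comparisons, accumulates the parameter and intermediate strings as it goes, and early-returns at the final character; Pre_ excludes negative from_index, where A either raises IndexError (from_index < -len(text)) or both programs wrap around the string end via Python negative indexing, an accidental corner where A's slice-computed groups and B's accumulated characters are both unspecifiable.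
-- outside the precondition, e.g. on _read_csi_sequence('m0', -1): A returns (1, '', '', 'm'), B returns (1, '0', '', 'm')
import Mathlib
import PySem

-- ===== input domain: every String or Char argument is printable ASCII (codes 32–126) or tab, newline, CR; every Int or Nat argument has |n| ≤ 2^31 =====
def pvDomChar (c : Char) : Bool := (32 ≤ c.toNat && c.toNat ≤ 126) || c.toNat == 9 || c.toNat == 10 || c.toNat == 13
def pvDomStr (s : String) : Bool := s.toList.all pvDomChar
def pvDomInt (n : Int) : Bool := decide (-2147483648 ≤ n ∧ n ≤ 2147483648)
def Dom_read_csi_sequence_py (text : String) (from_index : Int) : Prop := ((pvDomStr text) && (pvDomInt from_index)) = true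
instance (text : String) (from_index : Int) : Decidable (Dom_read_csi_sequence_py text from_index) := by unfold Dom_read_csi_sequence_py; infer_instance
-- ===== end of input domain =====

-- B fuses A's two scanning loops into a single character-classifying loop with accumulators (objective: simpler); equivalence proved for 0 ≤ from_index.


-- ===== PORT A =====
def isCsiParameterCharacter (character : Char) : Bool :=
  let code_point := character.toNat
  0x30 ≤ code_point && code_point ≤ 0x3F

def isCsiIntermediateCharacter (character : Char) : Bool :=
  let code_point := character.toNat
  0x20 ≤ code_point && code_point ≤ 0x2F

def isCsiFinalCharacter (character : Char) : Bool :=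
  let code_point := character.toNat
  0x40 ≤ code_point && code_point ≤ 0x7E

-- A's first while loop: advance index over parameter characters.
-- (pyGet? = none is where Python raises IndexError — outside Pre_; the port stops there.)
def csiParamLoop (text : String) (index : Int) : Int :=
  if _h : index < PySem.Str.len text then
    match PySem.Str.pyGet? text index with
    | some c => if isCsiParameterCharacter c then csiParamLoop text (index + 1) else index
    | none => index
  else index
termination_by (PySem.Str.len text - index).toNat
decreasing_by exact (Int.toNat_lt_toNat (Int.sub_pos.mpr _h)).mpr (sub_lt_sub_left (lt_add_one index) (PySem.Str.len text))

-- A's second while loop: advance index over intermediate characters.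
def csiInterLoop (text : String) (index : Int) : Int :=
  if _h : index < PySem.Str.len text then
    match PySem.Str.pyGet? text index with
    | some c => if isCsiIntermediateCharacter c then csiInterLoop text (index + 1) else index
    | none => index
  else index
termination_by (PySem.Str.len text - index).toNat
decreasing_by exact (Int.toNat_lt_toNat (Int.sub_pos.mpr _h)).mpr (sub_lt_sub_left (lt_add_one index) (PySem.Str.len text))

def read_csi_sequence_py (text : String) (from_index : Int) : Option (Int × String × String × String) :=
  let index := csiParamLoop text from_index
  let parameter_string := PySem.Str.slice text (some from_index) (some index)
  let intermediate_start_index := index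
  let index2 := csiInterLoop text intermediate_start_index
  let intermediate_string := PySem.Str.slice text (some intermediate_start_index) (some index2)
  let final_character : Option Char :=
    if index2 < PySem.Str.len text then PySem.Str.pyGet? text index2 else none
  match final_character with
  | none => none
  | some fc =>
      if ! isCsiFinalCharacter fc then none
      else some (index2 + 1, parameter_string, intermediate_string, String.ofList [fc])

-- ===== PORT B =====
-- B's single for-loop over range(from_index, len(text)); Python's character-range
-- comparisons ('0' <= ch <= '?', etc.) are ported exactly as code-point comparisons.
def altLoop (text : String) (index : Int) (parameters intermediates : List Char) :
    Option (Int × String × String × String) :=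
  if _h : index < PySem.Str.len text then
    match PySem.Str.pyGet? text index with
    | some character =>
        if (0x30 ≤ character.toNat ∧ character.toNat ≤ 0x3F) ∧ intermediates = [] then
          altLoop text (index + 1) (parameters ++ [character]) intermediates
        else if 0x20 ≤ character.toNat ∧ character.toNat ≤ 0x2F then
          altLoop text (index + 1) parameters (intermediates ++ [character])
        else if 0x40 ≤ character.toNat ∧ character.toNat ≤ 0x7E then
          some (index + 1, String.ofList parameters, String.ofList intermediates,
                String.ofList [character])
        else none
    | none => none
  else none
termination_by (PySem.Str.len text - index).toNat
decreasing_by all_goals exact (Int.toNat_lt_toNat (Int.sub_pos.mpr _h)).mpr (sub_lt_sub_left (lt_add_one index) (PySem.Str.len text))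

def read_csi_sequence_py_alt (text : String) (from_index : Int) :
    Option (Int × String × String × String) :=
  altLoop text from_index [] []

-- ===== PRECONDITION & SPEC =====
-- Pre_ excludes negative from_index: there A either raises IndexError (from_index < -len(text))
-- or both programs wrap around the string end via Python negative indexing, an accidental
-- corner where A's slice-computed groups and B's accumulated characters are both unspecifiable.
def Pre_read_csi_sequence_py (text : String) (from_index : Int) : Prop := 0 ≤ from_index
instance (text : String) (from_index : Int) : Decidable (Pre_read_csi_sequence_py text from_index) := by unfold Pre_read_csi_sequence_py; infer_instance

def pvWitness_read_csi_sequence_py : String × Int := ("1;2 m", 0)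

def Spec_read_csi_sequence_py (text : String) (from_index : Int) (out : Option (Int × String × String × String)) : Prop := out = read_csi_sequence_py_alt text from_index
instance (text : String) (from_index : Int) (out : Option (Int × String × String × String)) : Decidable (Spec_read_csi_sequence_py text from_index out) := by unfold Spec_read_csi_sequence_py; infer_instance

-- ===== CLAIM (what is proved, stated in full; the proofs are below) =====
def Claim_equal_read_csi_sequence_py : Prop := ∀ (text : String) (from_index : Int), Dom_read_csi_sequence_py text from_index → Pre_read_csi_sequence_py text from_index → Spec_read_csi_sequence_py text from_index (read_csi_sequence_py text from_index)

-- ===== LEMMAS AND PROOFS =====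

-- proof-side helpers
lemma pyGet?_some_of_lt (text : String) (i : Int) (h0 : 0 ≤ i)
    (hlt : i < PySem.Str.len text) : ∃ c, PySem.Str.pyGet? text i = some c := by
  have hl := PySem.Str.len_eq text
  have hlen : i.toNat < text.toList.length := by omega
  refine ⟨text.toList[i.toNat], ?_⟩
  have hb : PySem.Str.pyGet? text i = PySem.List.pyGet? text.toList i := by simp
  rw [hb, PySem.List.pyGet?_of_nonneg _ h0, List.getElem?_eq_getElem hlen]

def addP (ps : List Char) (r : Option (Int × String × String × String)) :
    Option (Int × String × String × String) :=
  match r with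
  | none => none
  | some (e, p, it, f) => some (e, String.ofList (ps ++ p.toList), it, f)

-- the common "intermediate scan then final-character check" tail of both programs
def finTail (text : String) (i : Int) (ps is : List Char) :
    Option (Int × String × String × String) :=
  let j := csiInterLoop text i
  match (if j < PySem.Str.len text then PySem.Str.pyGet? text j else none) with
  | some c =>
      if isCsiFinalCharacter c then
        some (j + 1, String.ofList ps,
              String.ofList (is ++ (PySem.Str.slice text (some i) (some j)).toList),
              String.ofList [c])
      else none
  | none => none

lemma pyGet?_lt (text : String) (i : Int) (c : Char) (h0 : 0 ≤ i)
    (h : PySem.Str.pyGet? text i = some c) : i < PySem.Str.len text := by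
  have h2 : PySem.List.pyGet? text.toList i = some c := by simpa using h
  rw [PySem.List.pyGet?_of_nonneg _ h0] at h2
  obtain ⟨h3, -⟩ := List.getElem?_eq_some_iff.mp h2
  have := PySem.Str.len_eq text
  omega

lemma slice_self (text : String) (i : Int) (h0 : 0 ≤ i) :
    (PySem.Str.slice text (some i) (some i)).toList = [] := by
  simp [PySem.Str.toList_slice, PySem.List.slice_toNat _ h0 h0]

lemma slice_cons (text : String) (i j : Int) (c : Char) (h0 : 0 ≤ i)
    (hc : PySem.Str.pyGet? text i = some c) (hij : i + 1 ≤ j) :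
    (PySem.Str.slice text (some i) (some j)).toList =
      c :: (PySem.Str.slice text (some (i + 1)) (some j)).toList := by
  have h2 : PySem.List.pyGet? text.toList i = some c := by simpa using hc
  rw [PySem.List.pyGet?_of_nonneg _ h0] at h2
  obtain ⟨h3, h4⟩ := List.getElem?_eq_some_iff.mp h2
  simp only [PySem.Str.toList_slice, PySem.Chars.slice_eq_listSlice]
  rw [PySem.List.slice_toNat _ h0 (by omega), PySem.List.slice_toNat _ (by omega) (by omega)]
  rw [List.drop_eq_getElem_cons h3]
  have hn : j.toNat - i.toNat = (j.toNat - (i+1).toNat) + 1 := by omega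
  rw [hn, List.take_succ_cons, h4]
  have he : (i + 1).toNat = i.toNat + 1 := by omega
  rw [he]

lemma str_eq_of_toList {s t : String} (h : s.toList = t.toList) : s = t :=
  String.toList_inj.mp h

lemma csiParamLoop_step (text : String) (i : Int) (c : Char) (h0 : 0 ≤ i)
    (hc : PySem.Str.pyGet? text i = some c) (hp : isCsiParameterCharacter c = true) :
    csiParamLoop text i = csiParamLoop text (i + 1) := by
  have hlt := pyGet?_lt text i c h0 hc
  conv_lhs => rw [csiParamLoop, dif_pos hlt, hc]
  simp [hp]

lemma csiParamLoop_stop (text : String) (i : Int) (c : Char)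
    (hc : PySem.Str.pyGet? text i = some c) (hp : isCsiParameterCharacter c = false) :
    csiParamLoop text i = i := by
  by_cases hlt : i < PySem.Str.len text
  · rw [csiParamLoop, dif_pos hlt, hc]; simp [hp]
  · rw [csiParamLoop, dif_neg hlt]

lemma csiParamLoop_stop_ge (text : String) (i : Int) (h : ¬ i < PySem.Str.len text) :
    csiParamLoop text i = i := by
  rw [csiParamLoop, dif_neg h]

lemma csiInterLoop_step (text : String) (i : Int) (c : Char) (h0 : 0 ≤ i)
    (hc : PySem.Str.pyGet? text i = some c) (hp : isCsiIntermediateCharacter c = true) :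
    csiInterLoop text i = csiInterLoop text (i + 1) := by
  have hlt := pyGet?_lt text i c h0 hc
  conv_lhs => rw [csiInterLoop, dif_pos hlt, hc]
  simp [hp]

lemma csiInterLoop_stop (text : String) (i : Int) (c : Char)
    (hc : PySem.Str.pyGet? text i = some c) (hp : isCsiIntermediateCharacter c = false) :
    csiInterLoop text i = i := by
  by_cases hlt : i < PySem.Str.len text
  · rw [csiInterLoop, dif_pos hlt, hc]; simp [hp]
  · rw [csiInterLoop, dif_neg hlt]

lemma csiInterLoop_stop_ge (text : String) (i : Int) (h : ¬ i < PySem.Str.len text) :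
    csiInterLoop text i = i := by
  rw [csiInterLoop, dif_neg h]

lemma csiParamLoop_ge (text : String) : ∀ (i : Int), i ≤ csiParamLoop text i := by
  have H : ∀ (k : Nat) (i : Int), (PySem.Str.len text - i).toNat = k → i ≤ csiParamLoop text i := by
    intro k
    induction k using Nat.strong_induction_on with
    | _ k IH =>
      intro i hk
      by_cases hlt : i < PySem.Str.len text
      · cases hget : PySem.Str.pyGet? text i with
        | none => rw [csiParamLoop, dif_pos hlt, hget]
        | some c =>
          by_cases hp : isCsiParameterCharacter c
          · rw [csiParamLoop, dif_pos hlt, hget]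
            simp only [hp, if_true]
            have := IH (PySem.Str.len text - (i+1)).toNat (by omega) (i+1) rfl
            omega
          · rw [csiParamLoop_stop text i c hget (by simpa using hp)]
      · rw [csiParamLoop_stop_ge text i hlt]
  intro i
  exact H _ i rfl


lemma csiInterLoop_ge (text : String) : ∀ (i : Int), i ≤ csiInterLoop text i := by
  have H : ∀ (k : Nat) (i : Int), (PySem.Str.len text - i).toNat = k → i ≤ csiInterLoop text i := by
    intro k
    induction k using Nat.strong_induction_on with
    | _ k IH =>
      intro i hk
      by_cases hlt : i < PySem.Str.len text
      · cases hget : PySem.Str.pyGet? text i with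
        | none => rw [csiInterLoop, dif_pos hlt, hget]
        | some c =>
          by_cases hp : isCsiIntermediateCharacter c
          · rw [csiInterLoop, dif_pos hlt, hget]
            simp only [hp, if_true]
            have := IH (PySem.Str.len text - (i+1)).toNat (by omega) (i+1) rfl
            omega
          · rw [csiInterLoop_stop text i c hget (by simpa using hp)]
      · rw [csiInterLoop_stop_ge text i hlt]
  intro i
  exact H _ i rfl


lemma finTail_step (text : String) (i : Int) (c : Char) (ps is : List Char) (h0 : 0 ≤ i)
    (hc : PySem.Str.pyGet? text i = some c) (hp : isCsiIntermediateCharacter c = true) :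
    finTail text i ps is = finTail text (i + 1) ps (is ++ [c]) := by
  have hstep := csiInterLoop_step text i c h0 hc hp
  have hge := csiInterLoop_ge text (i + 1)
  have hsl := slice_cons text i (csiInterLoop text (i + 1)) c h0 hc hge
  simp only [finTail, hstep]
  cases hcase : (if csiInterLoop text (i + 1) < PySem.Str.len text then
      PySem.Str.pyGet? text (csiInterLoop text (i + 1)) else none) with
  | none => rfl
  | some d =>
      by_cases hf : isCsiFinalCharacter d
      · simp only [hf, if_true]
        rw [hsl]
        simp
      · simp [hf]

lemma addP_finTail (text : String) (i : Int) (ps : List Char) :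
    addP ps (finTail text i [] []) = finTail text i ps [] := by
  simp only [finTail]
  cases hcase : (if csiInterLoop text i < PySem.Str.len text then
      PySem.Str.pyGet? text (csiInterLoop text i) else none) with
  | none => rfl
  | some d =>
      by_cases hf : isCsiFinalCharacter d
      · simp [addP, hf]
      · simp [addP, hf]

lemma A_eq_finTail (text : String) (i : Int) (h0 : 0 ≤ i)
    (hstop : csiParamLoop text i = i) :
    read_csi_sequence_py text i = finTail text i [] [] := by
  simp only [read_csi_sequence_py, finTail, hstop]
  cases hcase : (if csiInterLoop text i < PySem.Str.len text then
      PySem.Str.pyGet? text (csiInterLoop text i) else none) with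
  | none => rfl
  | some d =>
      by_cases hf : isCsiFinalCharacter d
      · simp only [hf, if_true, Bool.not_true, Bool.false_eq_true, if_false]
        refine congrArg some ?_
        refine Prod.ext rfl (Prod.ext ?_ (Prod.ext ?_ rfl))
        · exact str_eq_of_toList (by simp [slice_self text i h0])
        · exact str_eq_of_toList (by simp)
      · simp [hf]

lemma altLoop_inter (text : String) :
    ∀ (k : Nat) (i : Int) (ps is : List Char), (PySem.Str.len text - i).toNat = k → 0 ≤ i →
      is ≠ [] → altLoop text i ps is = finTail text i ps is := by
  intro k
  induction k using Nat.strong_induction_on with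
  | _ k IH =>
    intro i ps is hk h0 hne
    by_cases hlt : i < PySem.Str.len text
    · rw [altLoop, dif_pos hlt]
      split
      next c hget =>
        rw [if_neg (show ¬((0x30 ≤ c.toNat ∧ c.toNat ≤ 0x3F) ∧ is = []) from fun h => hne h.2)]
        by_cases hint : 0x20 ≤ c.toNat ∧ c.toNat ≤ 0x2F
        · rw [if_pos hint]
          have hih := IH (PySem.Str.len text - (i + 1)).toNat (by omega) (i + 1) ps
            (is ++ [c]) rfl (by omega) (by simp)
          rw [hih]
          exact (finTail_step text i c ps is h0 hget
            (by simp only [isCsiIntermediateCharacter]; simp; omega)).symm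
        · rw [if_neg hint]
          have hstop := csiInterLoop_stop text i c hget
            (by simp only [isCsiIntermediateCharacter]; simp; omega)
          by_cases hfin : 0x40 ≤ c.toNat ∧ c.toNat ≤ 0x7E
          · rw [if_pos hfin]
            simp only [finTail, hstop, if_pos hlt, hget]
            rw [if_pos (show isCsiFinalCharacter c = true by
              simp only [isCsiFinalCharacter]; simp; omega)]
            simp [slice_self text i h0]
          · rw [if_neg hfin]
            simp only [finTail, hstop, if_pos hlt, hget]
            rw [if_neg (show ¬ isCsiFinalCharacter c = true by
              simp only [isCsiFinalCharacter]; simp; omega)]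
      next hget =>
        obtain ⟨c, hget'⟩ := pyGet?_some_of_lt text i h0 hlt
        rw [hget] at hget'
        exact absurd hget' (by simp)
    · rw [altLoop, dif_neg hlt]
      have hstop := csiInterLoop_stop_ge text i hlt
      simp only [finTail, hstop]
      rw [if_neg hlt]

lemma altLoop_param (text : String) :
    ∀ (k : Nat) (i : Int) (ps : List Char), (PySem.Str.len text - i).toNat = k → 0 ≤ i →
      altLoop text i ps [] = addP ps (read_csi_sequence_py text i) := by
  intro k
  induction k using Nat.strong_induction_on with
  | _ k IH =>
    intro i ps hk h0
    by_cases hlt : i < PySem.Str.len text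
    · rw [altLoop, dif_pos hlt]
      split
      next c hget =>
        by_cases hparam : 0x30 ≤ c.toNat ∧ c.toNat ≤ 0x3F
        · rw [if_pos ⟨hparam, rfl⟩]
          have hih := IH (PySem.Str.len text - (i + 1)).toNat (by omega) (i + 1)
            (ps ++ [c]) rfl (by omega)
          rw [hih]
          have hpstep := csiParamLoop_step text i c h0 hget
            (by simp only [isCsiParameterCharacter]; simp; omega)
          have hge := csiParamLoop_ge text (i + 1)
          have hsl := slice_cons text i (csiParamLoop text (i + 1)) c h0 hget hge
          simp only [read_csi_sequence_py, hpstep]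
          cases hcase : (if csiInterLoop text (csiParamLoop text (i + 1)) < PySem.Str.len text then
              PySem.Str.pyGet? text (csiInterLoop text (csiParamLoop text (i + 1))) else none) with
          | none => rfl
          | some d =>
              by_cases hf : isCsiFinalCharacter d
              · simp only [addP, hf, Bool.not_true, Bool.false_eq_true, if_false]
                rw [hsl]
                simp
              · simp [addP, hf]
        · rw [if_neg (fun h => hparam h.1)]
          have hstop := csiParamLoop_stop text i c hget
            (by simp only [isCsiParameterCharacter]; simp; omega)
          rw [A_eq_finTail text i h0 hstop, addP_finTail]
          by_cases hint : 0x20 ≤ c.toNat ∧ c.toNat ≤ 0x2F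
          · rw [if_pos hint]
            simp only [List.nil_append]
            have hih2 := altLoop_inter text (PySem.Str.len text - (i + 1)).toNat (i + 1) ps
              [c] rfl (by omega) (by simp)
            rw [hih2]
            exact (finTail_step text i c ps [] h0 hget
              (by simp only [isCsiIntermediateCharacter]; simp; omega)).symm
          · rw [if_neg hint]
            have histop := csiInterLoop_stop text i c hget
              (by simp only [isCsiIntermediateCharacter]; simp; omega)
            by_cases hfin : 0x40 ≤ c.toNat ∧ c.toNat ≤ 0x7E
            · rw [if_pos hfin]
              simp only [finTail, histop, if_pos hlt, hget]
              rw [if_pos (show isCsiFinalCharacter c = true by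
                simp only [isCsiFinalCharacter]; simp; omega)]
              simp [slice_self text i h0]
            · rw [if_neg hfin]
              simp only [finTail, histop, if_pos hlt, hget]
              rw [if_neg (show ¬ isCsiFinalCharacter c = true by
                simp only [isCsiFinalCharacter]; simp; omega)]
      next hget =>
        obtain ⟨c, hget'⟩ := pyGet?_some_of_lt text i h0 hlt
        rw [hget] at hget'
        exact absurd hget' (by simp)
    · rw [altLoop, dif_neg hlt,
        A_eq_finTail text i h0 (csiParamLoop_stop_ge text i hlt), addP_finTail]
      have hstop := csiInterLoop_stop_ge text i hlt
      simp only [finTail, hstop]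
      rw [if_neg hlt]

-- ===== VERDICT (by name: the statement is the Claim_ definition above) =====
theorem read_csi_sequence_py_spec : Claim_equal_read_csi_sequence_py := by
  intro text from_index _hdom hpre
  unfold Spec_read_csi_sequence_py read_csi_sequence_py_alt
  have h := altLoop_param text (PySem.Str.len text - from_index).toNat from_index [] rfl hpre
  rw [h]
  unfold addP
  cases hr : read_csi_sequence_py text from_index with
  | none => rfl
  | some r =>
      obtain ⟨e, p, it, f⟩ := r
      simp
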